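-- pv_equiv track=rewrite | github.com/r2dt-bio/R2DT | utils/covariation.py | _build_partner_map
-- ===== SOURCE A (Python) =====
-- def _build_partner_map(structure: str) -> dict[int, int]:
--     """Build a base-pair partner map from a dot-bracket structure.
--
--     Returns a dict mapping each paired position index to its partner.
--     """
--     open_chars = "(<[{"
--     close_chars = ")>]}"
--     close_to_open = dict(zip(close_chars, open_chars))
--     stack: dict[str, list[int]] = {c: [] for c in open_chars}
--     partner: dict[int, int] = {}
--
--     for i, char in enumerate(structure):
--         if char in open_chars:
--             stack[char].append(i)
--         elif char in close_chars:
--             opener = close_to_open[char]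
--             if stack[opener]:
--                 j = stack[opener].pop()
--                 partner[i] = j
--                 partner[j] = i
--     return partner
-- ===== SOURCE B (Python) =====
-- def _build_partner_map(structure: str) -> dict[int, int]:
--     """Build a base-pair partner map from a dot-bracket structure.
--
--     Four independent passes, one per bracket type, each with a plain list
--     stack; the matched (closer, opener) events are then merged in closer
--     order and written into the partner dict.
--     """
--     events = []
--     for op, cl in [("(", ")"), ("<", ">"), ("[", "]"), ("{", "}")]:
--         stack = []
--         for i, char in enumerate(structure):
--             if char == op:
--                 stack.append(i)
--             elif char == cl and stack:
--                 events.append((i, stack.pop()))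
--     partner: dict[int, int] = {}
--     for i, j in sorted(events, key=lambda e: e[0]):
--         partner[i] = j
--         partner[j] = i
--     return partner
-- ===== Notes on version B (the rewrite author's own statement) =====
-- stated objective: alternative
-- what changed: A's single pass maintaining a dict of four bracket-type stacks is replaced by four independent passes (one per bracket type) each using one plain list stack, whose matched (closer, opener) events are then merged in closer order and written into the partner dict.
import Mathlib
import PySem

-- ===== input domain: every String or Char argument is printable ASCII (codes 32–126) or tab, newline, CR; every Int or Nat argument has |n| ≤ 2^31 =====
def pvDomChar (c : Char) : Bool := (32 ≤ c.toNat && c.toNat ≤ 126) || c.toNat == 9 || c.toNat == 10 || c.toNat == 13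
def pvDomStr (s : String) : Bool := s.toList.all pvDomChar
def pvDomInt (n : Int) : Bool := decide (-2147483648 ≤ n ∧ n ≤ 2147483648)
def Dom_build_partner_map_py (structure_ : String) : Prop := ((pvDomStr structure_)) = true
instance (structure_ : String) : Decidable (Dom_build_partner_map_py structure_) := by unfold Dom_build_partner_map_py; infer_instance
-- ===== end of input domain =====

-- B replaces A's one pass with a dict of four stacks by four independent passes
-- (one per bracket type, a single list stack each) whose matched events are merged
-- in closer order; objective: alternative decomposition, same cost.

-- ===== PORT A =====
def pvOpen : List Char := ['(', '<', '[', '{']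
def pvCloseL : List Char := [')', '>', ']', '}']
def pvCloseToOpen : PySem.Dict Char Char := PySem.Dict.ofList (pvCloseL.zip pvOpen)

def pvStepA (st : PySem.Dict Char (List Int) × PySem.Dict Int Int) (p : Int × Char) :
    PySem.Dict Char (List Int) × PySem.Dict Int Int :=
  if p.2 ∈ pvOpen then
    (st.1.modify p.2 [] (fun l => l ++ [p.1]), st.2)
  else if p.2 ∈ pvCloseL then
    -- close_to_open[char]: the key is always present since p.2 ∈ pvCloseL, so getD is exact
    let opener := pvCloseToOpen.getD p.2 ' '
    match (st.1.getD opener []).getLast? with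
    | some j => (st.1.modify opener [] List.dropLast, (st.2.insert p.1 j).insert j p.1)
    | none => st
  else st

def build_partner_map_py (structure_ : String) : List (Int × Int) :=
  let stack0 := pvOpen.foldl (fun d c => d.insert c ([] : List Int)) PySem.Dict.empty
  (((PySem.List.enumerate structure_.toList 0).foldl pvStepA (stack0, PySem.Dict.empty)).2).items

-- ===== PORT B =====
def pvIns2 (partner : PySem.Dict Int Int) (e : Int × Int) : PySem.Dict Int Int :=
  (partner.insert e.1 e.2).insert e.2 e.1

def pvStepB (op cl : Char) (st : List (Int × Int) × List Int) (ic : Int × Char) :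
    List (Int × Int) × List Int :=
  if ic.2 = op then (st.1, st.2 ++ [ic.1])
  else if ic.2 = cl then
    match st.2.getLast? with
    | some j => (st.1 ++ [(ic.1, j)], st.2.dropLast)
    | none => st
  else st

def build_partner_map_py_alt (structure_ : String) : List (Int × Int) :=
  let enum := PySem.List.enumerate structure_.toList 0
  let events := [('(', ')'), ('<', '>'), ('[', ']'), ('{', '}')].foldl
    (fun ev (p : Char × Char) => (enum.foldl (pvStepB p.1 p.2) (ev, [])).1) []
  ((PySem.List.sorted events (fun e => e.1) false).foldl pvIns2 PySem.Dict.empty).items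

-- ===== PRECONDITION & SPEC =====
def Spec_build_partner_map_py (structure_ : String) (out : List (Int × Int)) : Prop := out = build_partner_map_py_alt structure_
instance (structure_ : String) (out : List (Int × Int)) : Decidable (Spec_build_partner_map_py structure_ out) := by unfold Spec_build_partner_map_py; infer_instance

-- ===== CLAIM (what is proved, stated in full; the proofs are below) =====
def Claim_equal_build_partner_map_py : Prop := ∀ (structure_ : String), Dom_build_partner_map_py structure_ → Spec_build_partner_map_py structure_ (build_partner_map_py structure_)

-- ===== LEMMAS AND PROOFS =====

-- the four stacks of A's dict, as a literal dict
def pvMk4 (s1 s2 s3 s4 : List Int) : PySem.Dict Char (List Int) :=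
  PySem.Dict.mk [('(', s1), ('<', s2), ('[', s3), ('{', s4)]

-- the (closer, opener) events A's scan emits, with the four stacks explicit
def pvEvts : List (Int × Char) → List Int → List Int → List Int → List Int → List (Int × Int)
  | [], _, _, _, _ => []
  | (i, c) :: l, s1, s2, s3, s4 =>
    if c = '(' then pvEvts l (s1 ++ [i]) s2 s3 s4
    else if c = '<' then pvEvts l s1 (s2 ++ [i]) s3 s4
    else if c = '[' then pvEvts l s1 s2 (s3 ++ [i]) s4
    else if c = '{' then pvEvts l s1 s2 s3 (s4 ++ [i])
    else if c = ')' then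
      match s1.getLast? with
      | some j => (i, j) :: pvEvts l s1.dropLast s2 s3 s4
      | none => pvEvts l s1 s2 s3 s4
    else if c = '>' then
      match s2.getLast? with
      | some j => (i, j) :: pvEvts l s1 s2.dropLast s3 s4
      | none => pvEvts l s1 s2 s3 s4
    else if c = ']' then
      match s3.getLast? with
      | some j => (i, j) :: pvEvts l s1 s2 s3.dropLast s4
      | none => pvEvts l s1 s2 s3 s4
    else if c = '}' then
      match s4.getLast? with
      | some j => (i, j) :: pvEvts l s1 s2 s3 s4.dropLast
      | none => pvEvts l s1 s2 s3 s4
    else pvEvts l s1 s2 s3 s4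

-- the events B's pass for one bracket type emits
def pvPass (op cl : Char) : List (Int × Char) → List Int → List (Int × Int)
  | [], _ => []
  | (i, c) :: l, s =>
    if c = op then pvPass op cl l (s ++ [i])
    else if c = cl then
      match s.getLast? with
      | some j => (i, j) :: pvPass op cl l s.dropLast
      | none => pvPass op cl l s
    else pvPass op cl l s

theorem pvL1 (l : List (Int × Char)) : ∀ (s1 s2 s3 s4 : List Int) (p : PySem.Dict Int Int),
    (l.foldl pvStepA (pvMk4 s1 s2 s3 s4, p)).2
      = (pvEvts l s1 s2 s3 s4).foldl pvIns2 p := by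
  induction l with
  | nil => intro s1 s2 s3 s4 p; simp [pvEvts]
  | cons h t ih =>
    intro s1 s2 s3 s4 p
    obtain ⟨i, c⟩ := h
    simp only [List.foldl_cons]
    by_cases h1 : c = '('
    · subst h1
      rw [show pvStepA (pvMk4 s1 s2 s3 s4, p) (i, '(') = (pvMk4 (s1 ++ [i]) s2 s3 s4, p) from rfl]
      rw [ih]
      simp [pvEvts]
    by_cases h2 : c = '<'
    · subst h2
      rw [show pvStepA (pvMk4 s1 s2 s3 s4, p) (i, '<') = (pvMk4 s1 (s2 ++ [i]) s3 s4, p) from rfl]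
      rw [ih]
      simp [pvEvts]
    by_cases h3 : c = '['
    · subst h3
      rw [show pvStepA (pvMk4 s1 s2 s3 s4, p) (i, '[') = (pvMk4 s1 s2 (s3 ++ [i]) s4, p) from rfl]
      rw [ih]
      simp [pvEvts]
    by_cases h4 : c = '{'
    · subst h4
      rw [show pvStepA (pvMk4 s1 s2 s3 s4, p) (i, '{') = (pvMk4 s1 s2 s3 (s4 ++ [i]), p) from rfl]
      rw [ih]
      simp [pvEvts]
    by_cases g1 : c = ')'
    · subst g1
      rw [show pvStepA (pvMk4 s1 s2 s3 s4, p) (i, ')') = (match s1.getLast? with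
           | some j => (pvMk4 s1.dropLast s2 s3 s4, (p.insert i j).insert j i)
           | none => (pvMk4 s1 s2 s3 s4, p)) from rfl]
      cases hg : s1.getLast? with
      | some j => rw [ih]; simp [pvEvts, hg, pvIns2]
      | none => rw [ih]; simp [pvEvts, hg]
    by_cases g2 : c = '>'
    · subst g2
      rw [show pvStepA (pvMk4 s1 s2 s3 s4, p) (i, '>') = (match s2.getLast? with
           | some j => (pvMk4 s1 s2.dropLast s3 s4, (p.insert i j).insert j i)
           | none => (pvMk4 s1 s2 s3 s4, p)) from rfl]
      cases hg : s2.getLast? with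
      | some j => rw [ih]; simp [pvEvts, hg, pvIns2]
      | none => rw [ih]; simp [pvEvts, hg]
    by_cases g3 : c = ']'
    · subst g3
      rw [show pvStepA (pvMk4 s1 s2 s3 s4, p) (i, ']') = (match s3.getLast? with
           | some j => (pvMk4 s1 s2 s3.dropLast s4, (p.insert i j).insert j i)
           | none => (pvMk4 s1 s2 s3 s4, p)) from rfl]
      cases hg : s3.getLast? with
      | some j => rw [ih]; simp [pvEvts, hg, pvIns2]
      | none => rw [ih]; simp [pvEvts, hg]
    by_cases g4 : c = '}'
    · subst g4
      rw [show pvStepA (pvMk4 s1 s2 s3 s4, p) (i, '}') = (match s4.getLast? with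
           | some j => (pvMk4 s1 s2 s3 s4.dropLast, (p.insert i j).insert j i)
           | none => (pvMk4 s1 s2 s3 s4, p)) from rfl]
      cases hg : s4.getLast? with
      | some j => rw [ih]; simp [pvEvts, hg, pvIns2]
      | none => rw [ih]; simp [pvEvts, hg]
    · rw [show pvStepA (pvMk4 s1 s2 s3 s4, p) (i, c) = (pvMk4 s1 s2 s3 s4, p) from by
        simp [pvStepA, pvOpen, pvCloseL, h1, h2, h3, h4, g1, g2, g3, g4]]
      rw [ih]
      simp [pvEvts, h1, h2, h3, h4, g1, g2, g3, g4]

theorem pvL2 (op cl : Char) (l : List (Int × Char)) :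
    ∀ (ev : List (Int × Int)) (s : List Int),
    (l.foldl (pvStepB op cl) (ev, s)).1 = ev ++ pvPass op cl l s := by
  induction l with
  | nil => intro ev s; simp [pvPass]
  | cons h t ih =>
    intro ev s
    obtain ⟨i, c⟩ := h
    simp only [List.foldl_cons]
    by_cases h1 : c = op
    · simp [pvStepB, pvPass, h1, ih]
    · by_cases h2 : c = cl
      · have h3 : ¬ cl = op := fun e => h1 (h2.trans e)
        cases hg : s.getLast? with
        | some j => simp [pvStepB, pvPass, h2, h3, hg, ih]
        | none => simp [pvStepB, pvPass, h2, h3, hg, ih]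
      · simp [pvStepB, pvPass, h1, h2, ih]

theorem pv_cons_mid {α : Type} (a : α) (E X Y : List α) (h : E.Perm (X ++ Y)) :
    (a :: E).Perm (X ++ a :: Y) :=
  (h.cons a).trans List.perm_middle.symm

theorem pvL3 (l : List (Int × Char)) : ∀ (s1 s2 s3 s4 : List Int),
    (pvEvts l s1 s2 s3 s4).Perm
      (pvPass '(' ')' l s1 ++ pvPass '<' '>' l s2 ++ pvPass '[' ']' l s3 ++ pvPass '{' '}' l s4) := by
  induction l with
  | nil => intro s1 s2 s3 s4; simp [pvEvts, pvPass]
  | cons h t ih =>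
    intro s1 s2 s3 s4
    obtain ⟨i, c⟩ := h
    by_cases h1 : c = '('
    · subst h1; simpa [pvEvts, pvPass] using ih (s1 ++ [i]) s2 s3 s4
    by_cases h2 : c = '<'
    · subst h2; simpa [pvEvts, pvPass] using ih s1 (s2 ++ [i]) s3 s4
    by_cases h3 : c = '['
    · subst h3; simpa [pvEvts, pvPass] using ih s1 s2 (s3 ++ [i]) s4
    by_cases h4 : c = '{'
    · subst h4; simpa [pvEvts, pvPass] using ih s1 s2 s3 (s4 ++ [i])
    by_cases g1 : c = ')'
    · subst g1
      cases hg : s1.getLast? with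
      | some j =>
        have hp : (pvEvts t (s1.dropLast) s2 s3 s4).Perm ((([] : List (Int × Int))) ++ (pvPass '(' ')' t s1.dropLast ++ pvPass '<' '>' t s2 ++ pvPass '[' ']' t s3 ++ pvPass '{' '}' t s4)) := by
          simpa [List.append_assoc] using ih s1.dropLast s2 s3 s4
        have hm := pv_cons_mid (i, j) _ _ _ hp
        simpa [pvEvts, pvPass, hg, List.append_assoc] using hm
      | none => simpa [pvEvts, pvPass, hg] using ih s1 s2 s3 s4
    by_cases g2 : c = '>'
    · subst g2
      cases hg : s2.getLast? with
      | some j =>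
        have hp : (pvEvts t s1 (s2.dropLast) s3 s4).Perm ((pvPass '(' ')' t s1) ++ (pvPass '<' '>' t s2.dropLast ++ pvPass '[' ']' t s3 ++ pvPass '{' '}' t s4)) := by
          simpa [List.append_assoc] using ih s1 s2.dropLast s3 s4
        have hm := pv_cons_mid (i, j) _ _ _ hp
        simpa [pvEvts, pvPass, hg, List.append_assoc] using hm
      | none => simpa [pvEvts, pvPass, hg] using ih s1 s2 s3 s4
    by_cases g3 : c = ']'
    · subst g3
      cases hg : s3.getLast? with
      | some j =>
        have hp : (pvEvts t s1 s2 (s3.dropLast) s4).Perm ((pvPass '(' ')' t s1 ++ pvPass '<' '>' t s2) ++ (pvPass '[' ']' t s3.dropLast ++ pvPass '{' '}' t s4)) := by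
          simpa [List.append_assoc] using ih s1 s2 s3.dropLast s4
        have hm := pv_cons_mid (i, j) _ _ _ hp
        simpa [pvEvts, pvPass, hg, List.append_assoc] using hm
      | none => simpa [pvEvts, pvPass, hg] using ih s1 s2 s3 s4
    by_cases g4 : c = '}'
    · subst g4
      cases hg : s4.getLast? with
      | some j =>
        have hp : (pvEvts t s1 s2 s3 (s4.dropLast)).Perm ((pvPass '(' ')' t s1 ++ pvPass '<' '>' t s2 ++ pvPass '[' ']' t s3) ++ (pvPass '{' '}' t s4.dropLast)) := by
          simpa [List.append_assoc] using ih s1 s2 s3 s4.dropLast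
        have hm := pv_cons_mid (i, j) _ _ _ hp
        simpa [pvEvts, pvPass, hg, List.append_assoc] using hm
      | none => simpa [pvEvts, pvPass, hg] using ih s1 s2 s3 s4
    · simpa [pvEvts, pvPass, h1, h2, h3, h4, g1, g2, g3, g4] using ih s1 s2 s3 s4

theorem pvL4 (l : List (Int × Char)) : ∀ (s1 s2 s3 s4 : List Int),
    ((pvEvts l s1 s2 s3 s4).map Prod.fst).Sublist (l.map Prod.fst) := by
  induction l with
  | nil => intro s1 s2 s3 s4; simp [pvEvts]
  | cons h t ih =>
    intro s1 s2 s3 s4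
    obtain ⟨i, c⟩ := h
    by_cases h1 : c = '('
    · subst h1; simpa [pvEvts] using (ih (s1 ++ [i]) s2 s3 s4).cons i
    by_cases h2 : c = '<'
    · subst h2; simpa [pvEvts] using (ih s1 (s2 ++ [i]) s3 s4).cons i
    by_cases h3 : c = '['
    · subst h3; simpa [pvEvts] using (ih s1 s2 (s3 ++ [i]) s4).cons i
    by_cases h4 : c = '{'
    · subst h4; simpa [pvEvts] using (ih s1 s2 s3 (s4 ++ [i])).cons i
    by_cases g1 : c = ')'
    · subst g1
      cases hg : s1.getLast? with
      | some j => simpa [pvEvts, hg] using (ih s1.dropLast s2 s3 s4).cons₂ i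
      | none => simpa [pvEvts, hg] using (ih s1 s2 s3 s4).cons i
    by_cases g2 : c = '>'
    · subst g2
      cases hg : s2.getLast? with
      | some j => simpa [pvEvts, hg] using (ih s1 s2.dropLast s3 s4).cons₂ i
      | none => simpa [pvEvts, hg] using (ih s1 s2 s3 s4).cons i
    by_cases g3 : c = ']'
    · subst g3
      cases hg : s3.getLast? with
      | some j => simpa [pvEvts, hg] using (ih s1 s2 s3.dropLast s4).cons₂ i
      | none => simpa [pvEvts, hg] using (ih s1 s2 s3 s4).cons i
    by_cases g4 : c = '}'
    · subst g4
      cases hg : s4.getLast? with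
      | some j => simpa [pvEvts, hg] using (ih s1 s2 s3 s4.dropLast).cons₂ i
      | none => simpa [pvEvts, hg] using (ih s1 s2 s3 s4).cons i
    · simpa [pvEvts, h1, h2, h3, h4, g1, g2, g3, g4] using (ih s1 s2 s3 s4).cons i

-- ===== VERDICT (by name: the statement is the Claim_ definition above) =====
theorem build_partner_map_py_spec : Claim_equal_build_partner_map_py := by
  intro s _
  show build_partner_map_py s = build_partner_map_py_alt s
  unfold build_partner_map_py build_partner_map_py_alt
  simp only [List.foldl_cons, List.foldl_nil]
  rw [show (pvOpen.foldl (fun d c => d.insert c ([] : List Int)) PySem.Dict.empty) = pvMk4 [] [] [] [] from rfl]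
  rw [pvL1, pvL2, pvL2, pvL2, pvL2]
  simp only [List.nil_append]
  rw [PySem.List.sorted_eq_of_perm_of_pairwise_lt _ _ _ (pvL3 _ [] [] [] [])]
  · -- closer indices appear in scan order: a sublist of the enumerate indices
    refine List.pairwise_map.mp (List.Pairwise.sublist (pvL4 _ [] [] [] []) ?_)
    simp only [PySem.List.map_fst_enumerate]
    simpa using PySem.List.pairwise_lt_pyRange_one 0 (0 + (s.toList.length : Int))
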